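-- pv_equiv track=rewrite | github.com/kk7ds/chirp | chirp/drivers/puxing_px888k.py | decode_halfbytes
-- ===== SOURCE A (Python) =====
-- def decode_halfbytes(data, mapping, length):
--     """
--     construct a string from a datatype
--     where each half-byte maps to a character
--     """
--     s = ''
--     for i in range(length):
--         if i & 1 == 0:
--             s += mapping[(int(data[i >> 1]) & 0xf0) >> 4]
--         else:
--             s += mapping[int(data[i >> 1]) & 0x0f]
--     return s
-- ===== SOURCE B (Python) =====
-- def decode_halfbytes(data, mapping, length):
--     """
--     construct a string from a datatype
--     where each half-byte maps to a character
--     """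
--     if length <= 0:
--         return ''
--     chars = []
--     for b in range(length // 2):
--         byte = int(data[b])
--         chars.append(mapping[(byte & 0xf0) >> 4])
--         chars.append(mapping[byte & 0x0f])
--     if length % 2 == 1:
--         chars.append(mapping[(int(data[length // 2]) & 0xf0) >> 4])
--     return ''.join(chars)
-- ===== Notes on version B (the rewrite author's own statement) =====
-- stated objective: alternative
-- what changed: B iterates once per byte, emitting both mapped nibble characters per iteration into a list joined at the end (plus a single leftover high-nibble step for odd length), instead of A's per-halfbyte loop that re-fetches and re-converts the byte and tests i & 1 on every iteration and rebuilds the string with +=.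
import Mathlib
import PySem

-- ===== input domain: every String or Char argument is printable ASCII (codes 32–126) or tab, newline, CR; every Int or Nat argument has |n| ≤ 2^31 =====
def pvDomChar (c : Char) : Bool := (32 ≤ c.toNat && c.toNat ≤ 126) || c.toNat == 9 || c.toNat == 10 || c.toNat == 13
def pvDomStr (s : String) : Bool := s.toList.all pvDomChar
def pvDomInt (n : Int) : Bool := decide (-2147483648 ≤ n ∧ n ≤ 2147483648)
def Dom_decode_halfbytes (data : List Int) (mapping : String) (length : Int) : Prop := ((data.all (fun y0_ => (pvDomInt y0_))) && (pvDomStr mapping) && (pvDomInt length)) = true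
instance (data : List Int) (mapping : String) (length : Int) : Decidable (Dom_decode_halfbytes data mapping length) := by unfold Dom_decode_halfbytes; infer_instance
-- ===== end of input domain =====

-- B decodes one byte per iteration (two characters at once, plus one leftover high nibble
-- when length is odd) instead of A's per-halfbyte loop with a parity test: alternative decomposition.

-- ===== PORT A =====
-- string accumulation ported as a List Char accumulator with a final String.ofList
-- (Lean's own String.append is kernel-opaque); mapping[...] is PySem.Str.pyGet? with
-- .getD ' ' — Pre_ guarantees the index is in range, so the default is never used.
def decode_halfbytes (data : List Int) (mapping : String) (length : Int) : String :=
  String.ofList ((PySem.List.pyRange 0 length 1).foldl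
    (fun s i =>
      if PySem.Int.band i 1 == 0 then
        s ++ [(PySem.Str.pyGet? mapping
                ((PySem.Int.band (PySem.List.pyGetD data (i >>> (1:Nat)) 0) 240) >>> (4:Nat))).getD ' ']
      else
        s ++ [(PySem.Str.pyGet? mapping
                (PySem.Int.band (PySem.List.pyGetD data (i >>> (1:Nat)) 0) 15)).getD ' ']) [])

-- ===== PORT B =====
-- ''.join over a list of single characters ported as String.ofList of the List Char accumulator.
def decode_halfbytes_alt (data : List Int) (mapping : String) (length : Int) : String :=
  if length ≤ 0 then "" else
    let pairs := (PySem.List.pyRange 0 (PySem.Int.floordiv length 2) 1).foldl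
      (fun acc b =>
        let byte := PySem.List.pyGetD data b 0
        acc ++ [(PySem.Str.pyGet? mapping ((PySem.Int.band byte 240) >>> (4:Nat))).getD ' ',
                (PySem.Str.pyGet? mapping (PySem.Int.band byte 15)).getD ' ']) []
    let chars := if PySem.Int.mod length 2 == 1
      then pairs ++ [(PySem.Str.pyGet? mapping
             ((PySem.Int.band (PySem.List.pyGetD data (PySem.Int.floordiv length 2) 0) 240) >>> (4:Nat))).getD ' ']
      else pairs
    String.ofList chars

-- ===== PRECONDITION & SPEC =====
-- exactly the inputs on which Python A returns: data holds the length//2 (rounded up) bytes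
-- A reads, and every half-byte value A looks up is inside mapping (otherwise A raises IndexError).
def Pre_decode_halfbytes (data : List Int) (mapping : String) (length : Int) : Prop :=
  length.toNat ≤ 2 * data.length ∧
  ∀ b : Nat, b < (length.toNat + 1) / 2 →
    ((PySem.Int.band (data.getD b 0) 240) >>> (4:Nat)).toNat < mapping.toList.length ∧
    (2 * b + 1 < length.toNat →
      (PySem.Int.band (data.getD b 0) 15).toNat < mapping.toList.length)
instance (data : List Int) (mapping : String) (length : Int) : Decidable (Pre_decode_halfbytes data mapping length) := by unfold Pre_decode_halfbytes; infer_instance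

def pvWitness_decode_halfbytes : List Int × String × Int := ([18, 52], "0123456789abcdef", 4)

def Spec_decode_halfbytes (data : List Int) (mapping : String) (length : Int) (out : String) : Prop := out = decode_halfbytes_alt data mapping length
instance (data : List Int) (mapping : String) (length : Int) (out : String) : Decidable (Spec_decode_halfbytes data mapping length out) := by unfold Spec_decode_halfbytes; infer_instance

-- ===== CLAIM (what is proved, stated in full; the proofs are below) =====
def Claim_equal_decode_halfbytes : Prop := ∀ (data : List Int) (mapping : String) (length : Int), Dom_decode_halfbytes data mapping length → Pre_decode_halfbytes data mapping length → Spec_decode_halfbytes data mapping length (decode_halfbytes data mapping length)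

-- ===== LEMMAS AND PROOFS =====
def pvHi (data : List Int) (mapping : String) (b : Nat) : Char :=
  (PySem.Str.pyGet? mapping ((PySem.Int.band (PySem.List.pyGetD data (b:Int) 0) 240) >>> (4:Nat))).getD ' '
def pvLo (data : List Int) (mapping : String) (b : Nat) : Char :=
  (PySem.Str.pyGet? mapping (PySem.Int.band (PySem.List.pyGetD data (b:Int) 0) 15)).getD ' '
def pvF (data : List Int) (mapping : String) (i : Nat) : Char :=
  if i % 2 = 0 then pvHi data mapping (i/2) else pvLo data mapping (i/2)

lemma pv_band_one (k : Nat) : (PySem.Int.band (k:Int) 1 == 0) = (k % 2 == 0) := by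
  rw [PySem.Int.band_one, show ((2:Int)) = ((2:Nat):Int) from rfl, PySem.Int.mod_natCast]
  cases Nat.mod_two_eq_zero_or_one k with
  | inl h3 => simp [h3]
  | inr h3 => simp [h3]

lemma pv_shift_one (k : Nat) : ((k:Int) >>> (1:Nat)) = ((k / 2 : Nat) : Int) := by
  simp [Int.shiftRight_eq_div_pow]

lemma pvA_eq (data : List Int) (mapping : String) (length : Int) :
    decode_halfbytes data mapping length =
      String.ofList ((List.range length.toNat).map (pvF data mapping)) := by
  unfold decode_halfbytes
  rw [PySem.List.pyRange_one, List.foldl_map]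
  congr 1
  have hfn : (fun (s : List Char) (k : Nat) =>
      (fun s i =>
        if PySem.Int.band i 1 == 0 then
          s ++ [(PySem.Str.pyGet? mapping
                  ((PySem.Int.band (PySem.List.pyGetD data (i >>> (1:Nat)) 0) 240) >>> (4:Nat))).getD ' ']
        else
          s ++ [(PySem.Str.pyGet? mapping
                  (PySem.Int.band (PySem.List.pyGetD data (i >>> (1:Nat)) 0) 15)).getD ' ']) s (0 + (k:Int)))
      = fun s k => s ++ [pvF data mapping k] := by
    funext s k
    simp only [zero_add, pv_band_one, pv_shift_one, pvF, pvHi, pvLo]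
    by_cases h : k % 2 = 0 <;> simp [h]
  rw [hfn]
  have h0 : (length - 0).toNat = length.toNat := by omega
  rw [h0, PySem.List.foldl_append_singleton_eq_map]
  simp

lemma pv_range_split (data : List Int) (mapping : String) : ∀ n : Nat,
    (List.range n).map (pvF data mapping) =
      (List.range (n/2)).flatMap (fun b => [pvHi data mapping b, pvLo data mapping b]) ++
        (if n % 2 == 1 then [pvHi data mapping (n/2)] else []) := by
  intro n
  induction n with
  | zero => simp
  | succ m ih =>
    rw [List.range_succ, List.map_append, ih]
    by_cases hm : m % 2 = 0
    · have h1 : (m+1) / 2 = m / 2 := by omega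
      have h2 : ((m+1) % 2 == 1) = true := by
        have : (m+1) % 2 = 1 := by omega
        simp [this]
      have h3 : (m % 2 == 1) = false := by simp [hm]
      simp [h1, h2, pvF, hm]
    · have hm1 : m % 2 = 1 := by omega
      have h1 : (m+1) / 2 = m / 2 + 1 := by omega
      have h2 : ((m+1) % 2 == 1) = false := by
        have : (m+1) % 2 = 0 := by omega
        simp [this]
      have h3 : (m % 2 == 1) = true := by simp [hm1]
      simp [h1, h2, pvF, hm1, List.range_succ, List.append_assoc]

lemma pvB_eq (data : List Int) (mapping : String) (length : Int) :
    decode_halfbytes_alt data mapping length =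
      String.ofList ((List.range length.toNat).map (pvF data mapping)) := by
  unfold decode_halfbytes_alt
  by_cases hle : length ≤ 0
  · have h0 : length.toNat = 0 := by omega
    simp [hle, h0]
  · have hfd : PySem.Int.floordiv length 2 = ((length.toNat / 2 : Nat) : Int) := by
      rw [PySem.Int.floordiv_eq_ediv_of_pos (by omega)]; omega
    have hmod : (PySem.Int.mod length 2 == 1) = (length.toNat % 2 == 1) := by
      rw [PySem.Int.mod_eq_emod_of_pos (by omega)]
      have h2 : length % 2 = ((length.toNat % 2 : Nat) : Int) := by omega
      rw [h2]
      cases Nat.mod_two_eq_zero_or_one length.toNat with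
      | inl h3 => simp [h3]
      | inr h3 => simp [h3]
    simp only [hle, if_false, hfd, hmod]
    rw [PySem.List.pyRange_one, List.foldl_map]
    have hfn : (fun (acc : List Char) (b : Nat) =>
        (fun acc (b : Int) =>
          let byte := PySem.List.pyGetD data b 0
          acc ++ [(PySem.Str.pyGet? mapping ((PySem.Int.band byte 240) >>> (4:Nat))).getD ' ',
                  (PySem.Str.pyGet? mapping (PySem.Int.band byte 15)).getD ' ']) acc (0 + (b:Int)))
        = fun acc b => acc ++ [pvHi data mapping b, pvLo data mapping b] := by
      funext acc b
      simp [pvHi, pvLo]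
    rw [hfn]
    have h0 : (((length.toNat / 2 : Nat) : Int) - 0).toNat = length.toNat / 2 := by omega
    rw [h0, PySem.List.foldl_append_eq_flatMap]
    rw [pv_range_split data mapping length.toNat]
    congr 1
    by_cases hp : (length.toNat % 2 == 1) = true
    · simp only [hp, if_true]
      rfl
    · have hne : ¬ length.toNat % 2 = 1 := by simpa using hp
      simp [hne]

-- ===== VERDICT (by name: the statement is the Claim_ definition above) =====
theorem decode_halfbytes_spec : Claim_equal_decode_halfbytes := by
  intro data mapping length _ _
  unfold Spec_decode_halfbytes
  rw [pvA_eq, pvB_eq]
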